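-- pv_equiv track=rewrite | github.com/conor-csm/psc-checker | app.py | classify_pscs
-- ===== SOURCE A (Python) =====
-- CORPORATE_KINDS = {
--     'corporate-entity-person-with-significant-control',
--     'legal-person-person-with-significant-control',
--     'super-secure-person-with-significant-control',
-- }
--
-- INDIVIDUAL_KINDS = {'individual-person-with-significant-control'}
--
-- def classify_pscs(pscs):
--     if not pscs:
--         return 'None'
--     has_corp = any(p.get('kind') in CORPORATE_KINDS for p in pscs)
--     has_ind = any(p.get('kind') in INDIVIDUAL_KINDS for p in pscs)
--     if has_corp and has_ind:
--         return 'Mixed'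
--     if has_corp:
--         return 'Corporate'
--     if has_ind:
--         return 'Individual'
--     return 'Unknown'
-- ===== SOURCE B (Python) =====
-- CORPORATE_KINDS = {
--     'corporate-entity-person-with-significant-control',
--     'legal-person-person-with-significant-control',
--     'super-secure-person-with-significant-control',
-- }
--
-- INDIVIDUAL_KINDS = {'individual-person-with-significant-control'}
--
-- _LABELS = ('Unknown', 'Corporate', 'Individual', 'Mixed')
--
-- def classify_pscs(pscs):
--     if not pscs:
--         return 'None'
--     mask = 0
--     for p in pscs:
--         k = p.get('kind')
--         mask |= (k in CORPORATE_KINDS) | ((k in INDIVIDUAL_KINDS) << 1)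
--         if mask == 3:
--             break
--     return _LABELS[mask]
-- ===== Notes on version B (the rewrite author's own statement) =====
-- stated objective: alternative
-- what changed: B makes a single pass accumulating a 2-bit presence mask (bit0=corporate, bit1=individual) with an early break once both bits are set, then answers by indexing a label table, replacing A's two any()-scans and four-way return ladder.
import Mathlib
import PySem

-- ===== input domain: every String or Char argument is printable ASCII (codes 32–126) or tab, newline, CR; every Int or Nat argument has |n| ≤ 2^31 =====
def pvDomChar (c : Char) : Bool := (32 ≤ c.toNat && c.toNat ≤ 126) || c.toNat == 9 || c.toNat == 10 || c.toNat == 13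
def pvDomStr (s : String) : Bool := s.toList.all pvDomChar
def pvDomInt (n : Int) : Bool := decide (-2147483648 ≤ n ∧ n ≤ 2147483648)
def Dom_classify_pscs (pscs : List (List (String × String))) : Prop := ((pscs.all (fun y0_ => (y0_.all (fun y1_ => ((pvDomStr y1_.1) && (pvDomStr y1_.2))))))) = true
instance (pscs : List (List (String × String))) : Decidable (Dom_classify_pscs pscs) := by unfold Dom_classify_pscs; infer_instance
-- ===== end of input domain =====

-- B makes one pass building a 2-bit presence mask (early break at 3) and indexes a label table, instead of A's two any-scans and return ladder; alternative structure, same results.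
-- ===== PORT A =====
def corporateKinds : List String :=
  ["corporate-entity-person-with-significant-control",
   "legal-person-person-with-significant-control",
   "super-secure-person-with-significant-control"]

def individualKinds : List String :=
  ["individual-person-with-significant-control"]

-- p.get('kind') in KINDS : None is never in a set of strings
def kindIn (p : List (String × String)) (t : List String) : Bool :=
  match (PySem.Dict.mk p).get? "kind" with
  | some k => t.contains k
  | none => false

def classify_pscs (pscs : List (List (String × String))) : String :=
  if pscs.isEmpty then "None" else
  let has_corp := pscs.any (fun p => kindIn p corporateKinds)
  let has_ind := pscs.any (fun p => kindIn p individualKinds)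
  if has_corp && has_ind then "Mixed"
  else if has_corp then "Corporate"
  else if has_ind then "Individual"
  else "Unknown"

-- ===== PORT B =====
def pyLabels : List String := ["Unknown", "Corporate", "Individual", "Mixed"]

-- the for-loop with 'break' of Source B
def maskLoop : List (List (String × String)) → Nat → Nat
  | [], mask => mask
  | p :: ps, mask =>
    let k := (PySem.Dict.mk p).get? "kind"
    let mask' := mask |||
      ((if corporateKinds.contains (k.getD "") && k.isSome then 1 else 0) |||
       ((if individualKinds.contains (k.getD "") && k.isSome then 1 else 0) <<< 1))
    if mask' == 3 then mask' else maskLoop ps mask'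

def classify_pscs_alt (pscs : List (List (String × String))) : String :=
  if pscs.isEmpty then "None" else
  pyLabels.getD (maskLoop pscs 0) ""

-- ===== PRECONDITION & SPEC =====
def Spec_classify_pscs (pscs : List (List (String × String))) (out : String) : Prop := out = classify_pscs_alt pscs
instance (pscs : List (List (String × String))) (out : String) : Decidable (Spec_classify_pscs pscs out) := by unfold Spec_classify_pscs; infer_instance

-- ===== CLAIM (what is proved, stated in full; the proofs are below) =====
def Claim_equal_classify_pscs : Prop := ∀ (pscs : List (List (String × String))), Dom_classify_pscs pscs → Spec_classify_pscs pscs (classify_pscs pscs)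

-- ===== LEMMAS AND PROOFS =====
-- the mask encoding two boolean flags
def m2 (b1 b2 : Bool) : Nat := (if b1 then 1 else 0) ||| ((if b2 then 1 else 0) <<< 1)

theorem m2_lor (b1 b2 c i : Bool) :
    m2 b1 b2 ||| ((if c then 1 else 0) ||| ((if i then 1 else 0) <<< 1)) = m2 (b1 || c) (b2 || i) := by
  cases b1 <;> cases b2 <;> cases c <;> cases i <;> decide

theorem m2_eq3 (b1 b2 : Bool) : (m2 b1 b2 == 3) = (b1 && b2) := by
  cases b1 <;> cases b2 <;> decide

theorem kindIn_eq' (p : List (String × String)) (t : List String) (ht : t.contains "" = false) :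
    (t.contains (((PySem.Dict.mk p).get? "kind").getD "") && ((PySem.Dict.mk p).get? "kind").isSome) = kindIn p t := by
  unfold kindIn
  cases (PySem.Dict.mk p).get? "kind" <;> simp [ht]

theorem maskLoop_eq (l : List (List (String × String))) (b1 b2 : Bool) :
    maskLoop l (m2 b1 b2)
      = m2 (b1 || l.any (fun p => kindIn p corporateKinds)) (b2 || l.any (fun p => kindIn p individualKinds)) := by
  induction l generalizing b1 b2 with
  | nil => simp [maskLoop]
  | cons p ps ih =>
    rw [maskLoop]
    simp only [kindIn_eq' p corporateKinds (by decide), kindIn_eq' p individualKinds (by decide)]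
      at *
    rw [m2_lor, m2_eq3]
    by_cases h : (b1 || kindIn p corporateKinds) && (b2 || kindIn p individualKinds)
    · rw [h]
      simp only [List.any_cons]
      rcases (Bool.and_eq_true _ _).mp h with ⟨h1, h2⟩
      rw [← Bool.or_assoc, h1, ← Bool.or_assoc, h2]
      simp
    · rw [Bool.not_eq_true] at h
      rw [h, if_neg (by simp), ih]
      simp [List.any_cons, Bool.or_assoc]

-- ===== VERDICT (by name: the statement is the Claim_ definition above) =====
theorem classify_pscs_spec : Claim_equal_classify_pscs := by
  intro pscs _
  unfold Spec_classify_pscs classify_pscs classify_pscs_alt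
  by_cases he : pscs.isEmpty
  · simp [he]
  · rw [if_neg he, if_neg he]
    have h0 : (0 : Nat) = m2 false false := by decide
    rw [h0, maskLoop_eq]
    cases hc : pscs.any (fun p => kindIn p corporateKinds) <;>
      cases hi : pscs.any (fun p => kindIn p individualKinds) <;>
      simp [m2, pyLabels]
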